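-- pv_equiv track=rewrite | github.com/kabilan-d-22/pdf | sem_5_4.py | shear_3d
-- ===== SOURCE A (Python) =====
-- def shear_3d(points, shxy=0, shxz=0, shyx=0, shyz=0, shzx=0, shzy=0):
--     result = []
--     for x, y, z in points:
--         x_new = x + shxy * y + shxz * z
--         y_new = y + shyx * x + shyz * z
--         z_new = z + shzx * x + shzy * y
--         result.append((x_new, y_new, z_new))
--     return result
-- ===== SOURCE B (Python) =====
-- def shear_3d(points, shxy=0, shxz=0, shyx=0, shyz=0, shzx=0, shzy=0):
--     M = [[1, shxy, shxz], [shyx, 1, shyz], [shzx, shzy, 1]]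
--     return [tuple(sum(M[i][j] * p[j] for j in range(3)) for i in range(3))
--             for p in points]
-- ===== Notes on version B (the rewrite author's own statement) =====
-- stated objective: idiomatic
-- what changed: B builds the explicit 3x3 shear matrix once and produces each output point by a generic row-by-column matrix-vector multiply (sum over a range), instead of A's three hand-written per-coordinate formulas in a loop with append.
import Mathlib
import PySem

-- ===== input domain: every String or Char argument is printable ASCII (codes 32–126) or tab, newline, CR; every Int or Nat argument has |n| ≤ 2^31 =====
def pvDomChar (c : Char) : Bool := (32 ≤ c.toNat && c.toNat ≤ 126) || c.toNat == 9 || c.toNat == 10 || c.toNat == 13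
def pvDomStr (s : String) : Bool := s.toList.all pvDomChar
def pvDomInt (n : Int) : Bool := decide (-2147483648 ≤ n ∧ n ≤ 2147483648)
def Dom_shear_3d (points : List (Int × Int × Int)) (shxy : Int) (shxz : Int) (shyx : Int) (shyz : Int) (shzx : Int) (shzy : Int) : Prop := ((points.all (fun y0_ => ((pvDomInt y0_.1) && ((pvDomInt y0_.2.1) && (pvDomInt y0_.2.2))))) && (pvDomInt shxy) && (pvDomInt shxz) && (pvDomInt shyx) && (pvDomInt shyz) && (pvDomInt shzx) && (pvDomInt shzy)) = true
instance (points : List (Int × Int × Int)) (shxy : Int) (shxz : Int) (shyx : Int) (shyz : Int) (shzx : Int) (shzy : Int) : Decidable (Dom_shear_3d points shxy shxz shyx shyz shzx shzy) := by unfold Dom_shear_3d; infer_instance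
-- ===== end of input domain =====

-- B applies the shear through an explicit 3x3 matrix with a generic matrix-vector multiply (idiomatic; same cost).

-- ===== PORT A =====
-- literal port: loop over points, per-coordinate formulas, append to result
def shear_3d (points : List (Int × Int × Int)) (shxy : Int) (shxz : Int) (shyx : Int) (shyz : Int) (shzx : Int) (shzy : Int) : List (Int × Int × Int) :=
  points.foldl
    (fun result t =>
      result ++ [(t.1 + shxy * t.2.1 + shxz * t.2.2,
                  t.2.1 + shyx * t.1 + shyz * t.2.2,
                  t.2.2 + shzx * t.1 + shzy * t.2.1)]) []

-- ===== PORT B =====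
-- sum(M[i][j] * p[j] for j in range(3)): fold over column indices starting at 0
def pvDotRow (row : List Int) (p : List Int) : Int :=
  (List.range 3).foldl (fun acc j => acc + row.getD j 0 * p.getD j 0) 0

def shear_3d_alt (points : List (Int × Int × Int)) (shxy : Int) (shxz : Int) (shyx : Int) (shyz : Int) (shzx : Int) (shzy : Int) : List (Int × Int × Int) :=
  let M : List (List Int) := [[1, shxy, shxz], [shyx, 1, shyz], [shzx, shzy, 1]]
  points.map (fun t =>
    let p := [t.1, t.2.1, t.2.2]
    (pvDotRow (M.getD 0 []) p, pvDotRow (M.getD 1 []) p, pvDotRow (M.getD 2 []) p))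

-- ===== PRECONDITION & SPEC =====
def Spec_shear_3d (points : List (Int × Int × Int)) (shxy : Int) (shxz : Int) (shyx : Int) (shyz : Int) (shzx : Int) (shzy : Int) (out : List (Int × Int × Int)) : Prop := out = shear_3d_alt points shxy shxz shyx shyz shzx shzy
instance (points : List (Int × Int × Int)) (shxy : Int) (shxz : Int) (shyx : Int) (shyz : Int) (shzx : Int) (shzy : Int) (out : List (Int × Int × Int)) : Decidable (Spec_shear_3d points shxy shxz shyx shyz shzx shzy out) := by unfold Spec_shear_3d; infer_instance

-- ===== CLAIM (what is proved, stated in full; the proofs are below) =====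
def Claim_equal_shear_3d : Prop := ∀ (points : List (Int × Int × Int)) (shxy : Int) (shxz : Int) (shyx : Int) (shyz : Int) (shzx : Int) (shzy : Int), Dom_shear_3d points shxy shxz shyx shyz shzx shzy → Spec_shear_3d points shxy shxz shyx shyz shzx shzy (shear_3d points shxy shxz shyx shyz shzx shzy)

-- ===== LEMMAS AND PROOFS =====

theorem shear_3d_foldl_acc (points : List (Int × Int × Int)) (shxy shxz shyx shyz shzx shzy : Int) (acc : List (Int × Int × Int)) :
    points.foldl
      (fun result t =>
        result ++ [(t.1 + shxy * t.2.1 + shxz * t.2.2,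
                    t.2.1 + shyx * t.1 + shyz * t.2.2,
                    t.2.2 + shzx * t.1 + shzy * t.2.1)]) acc
    = acc ++ points.map (fun t =>
        (t.1 + shxy * t.2.1 + shxz * t.2.2,
         t.2.1 + shyx * t.1 + shyz * t.2.2,
         t.2.2 + shzx * t.1 + shzy * t.2.1)) := by
  induction points generalizing acc with
  | nil => simp
  | cons h tl ih => simp [List.foldl, ih]

-- ===== VERDICT (by name: the statement is the Claim_ definition above) =====
theorem shear_3d_spec : Claim_equal_shear_3d := by
  intro points shxy shxz shyx shyz shzx shzy _
  unfold Spec_shear_3d shear_3d shear_3d_alt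
  rw [shear_3d_foldl_acc]
  simp only [List.nil_append]
  refine List.map_congr_left (fun t _ => ?_)
  simp [pvDotRow, List.range_succ, List.getD]
  ring_nf
  exact ⟨trivial, trivial⟩
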